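-- pv_equiv track=rewrite | github.com/johnoliverdriscoll/project-euler | py/euler-0049.py | permutate
-- ===== SOURCE A (Python) =====
-- def permutate(s, not_first = '0'):
--   if len(s) == 1:
--     yield s
--   else:
--     for i in range(0, len(s)):
--       if not_first == None or s[i] != not_first:
--         for p in permutate(s[:i] + s[i + 1:], None):
--           yield s[i] + p
-- ===== SOURCE B (Python) =====
-- def permutate(s, not_first = '0'):
--   if len(s) == 1:
--     yield s
--     return
--   # breadth-first: expand all (prefix, remaining) states level by level
--   states = [(s[i], s[:i] + s[i + 1:]) for i in range(len(s))
--             if not_first == None or s[i] != not_first]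
--   while states and states[0][1]:
--     states = [(pre + rest[j], rest[:j] + rest[j + 1:])
--               for pre, rest in states for j in range(len(rest))]
--   for pre, _ in states:
--     yield pre
-- ===== Notes on version B (the rewrite author's own statement) =====
-- stated objective: alternative
-- what changed: Replaces A's nested-generator DFS recursion by an iterative breadth-first expansion of (prefix, remaining) states, one level per loop iteration, yielding the finished prefixes at the end.
import Mathlib
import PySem

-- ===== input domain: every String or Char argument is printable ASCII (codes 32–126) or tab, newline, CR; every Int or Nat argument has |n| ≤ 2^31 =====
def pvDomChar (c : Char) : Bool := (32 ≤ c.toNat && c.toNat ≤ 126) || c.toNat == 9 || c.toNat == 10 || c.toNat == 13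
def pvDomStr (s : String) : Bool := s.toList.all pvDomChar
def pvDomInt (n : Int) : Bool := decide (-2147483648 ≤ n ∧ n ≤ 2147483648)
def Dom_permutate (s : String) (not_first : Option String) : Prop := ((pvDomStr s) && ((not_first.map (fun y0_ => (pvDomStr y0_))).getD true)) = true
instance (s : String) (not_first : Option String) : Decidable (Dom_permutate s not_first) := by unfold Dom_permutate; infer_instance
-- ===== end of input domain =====

-- B replaces A's recursive DFS generator by an iterative breadth-first state expansion; both Pythons are generators, equivalence is about the list of yielded strings.

-- ===== PORT A =====
-- fuel = s.length suffices: each recursive call removes one character.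
def permutateCoreA (fuel : Nat) (s : List Char) (nf : Option String) : List (List Char) :=
  if s.length = 1 then [s]
  else
    match fuel with
    | 0 => []
    | f + 1 =>
      (List.range s.length).flatMap (fun i =>
        let c := s.getD i ' '
        if nf = none ∨ ¬ nf = some (String.ofList [c]) then
          (permutateCoreA f (s.take i ++ s.drop (i + 1)) none).map (fun p => c :: p)
        else [])

def permutate (s : String) (not_first : Option String) : List String :=
  (permutateCoreA s.toList.length s.toList not_first).map String.ofList

-- ===== PORT B =====
-- one BFS level: extend every (prefix, remaining) state by each remaining position
def pvExpandB (states : List (List Char × List Char)) : List (List Char × List Char) :=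
  states.flatMap (fun pr =>
    (List.range pr.2.length).map (fun j =>
      (pr.1 ++ [pr.2.getD j ' '], pr.2.take j ++ pr.2.drop (j + 1))))

-- the while loop; fuel = s.length suffices (each level shortens every remaining part by one)
def pvLoopB (fuel : Nat) (states : List (List Char × List Char)) : List (List Char × List Char) :=
  match fuel with
  | 0 => states
  | f + 1 =>
    if states ≠ [] ∧ ((states.head?.map Prod.snd).getD []) ≠ [] then pvLoopB f (pvExpandB states)
    else states

def permutate_alt (s : String) (not_first : Option String) : List String :=
  let cs := s.toList
  if cs.length = 1 then [s]
  else
    let init := (List.range cs.length).flatMap (fun i =>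
      let c := cs.getD i ' '
      if not_first = none ∨ ¬ not_first = some (String.ofList [c]) then
        [([c], cs.take i ++ cs.drop (i + 1))]
      else [])
    (pvLoopB cs.length init).map (fun pr => String.ofList pr.1)

-- ===== PRECONDITION & SPEC =====
def Spec_permutate (s : String) (not_first : Option String) (out : List String) : Prop := out = permutate_alt s not_first
instance (s : String) (not_first : Option String) (out : List String) : Decidable (Spec_permutate s not_first out) := by unfold Spec_permutate; infer_instance

-- ===== CLAIM (what is proved, stated in full; the proofs are below) =====
def Claim_equal_permutate : Prop := ∀ (s : String) (not_first : Option String), Dom_permutate s not_first → Spec_permutate s not_first (permutate s not_first)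

-- ===== LEMMAS AND PROOFS =====

-- full permutations (no filter), DFS-by-index order, with fuel; [[]] on the empty list
def pvFP : Nat → List Char → List (List Char)
  | _, [] => [[]]
  | 0, _ :: _ => []
  | f + 1, a :: t =>
    (List.range (a :: t).length).flatMap (fun i =>
      (pvFP f ((a :: t).take i ++ (a :: t).drop (i + 1))).map (fun p => (a :: t).getD i ' ' :: p))

theorem pv_del_length (s : List Char) (i : Nat) (h : i < s.length) :
    (s.take i ++ s.drop (i + 1)).length = s.length - 1 := by
  simp [List.length_append, List.length_take, List.length_drop]; omega

theorem pv_coreA_none (f : Nat) (s : List Char) (hne : s ≠ []) (hf : s.length ≤ f) :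
    permutateCoreA f s none = pvFP f s := by
  induction f generalizing s with
  | zero =>
    exfalso; have : 0 < s.length := List.length_pos_iff.mpr hne; omega
  | succ g ih =>
    by_cases h1 : s.length = 1
    · obtain ⟨c, rfl⟩ : ∃ c, s = [c] := by
        match s, h1 with | [c], _ => exact ⟨c, rfl⟩
      simp [permutateCoreA, pvFP]
    · obtain ⟨a, t, rfl⟩ : ∃ a t, s = a :: t := by
        cases s with
        | nil => exact absurd rfl hne
        | cons a t => exact ⟨a, t, rfl⟩
      rw [permutateCoreA, if_neg h1, pvFP]
      apply List.flatMap_congr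
      intro i hi
      have hi' : i < (a :: t).length := List.mem_range.mp hi
      have hlen : ((a :: t).take i ++ (a :: t).drop (i + 1)).length = (a :: t).length - 1 :=
        pv_del_length _ _ hi'
      have hc : (a :: t).length = t.length + 1 := rfl
      have ht0 : t.length ≠ 0 := by
        intro h0
        exact h1 (by rw [hc, h0])
      have hne' : (a :: t).take i ++ (a :: t).drop (i + 1) ≠ [] :=
        List.length_pos_iff.mp (by rw [hlen, hc]; omega)
      have hle : ((a :: t).take i ++ (a :: t).drop (i + 1)).length ≤ g := by
        rw [hlen, hc]
        rw [hc] at hf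
        omega
      have heq := ih _ hne' hle
      simp only [heq]
      simp

theorem pv_expand_uniform (st : List (List Char × List Char)) (L : Nat)
    (hU : ∀ pr ∈ st, pr.2.length = L + 1) :
    ∀ pr ∈ pvExpandB st, pr.2.length = L := by
  intro pr hpr
  simp only [pvExpandB, List.mem_flatMap, List.mem_map] at hpr
  obtain ⟨q, hq, j, hj, rfl⟩ := hpr
  have hj' : j < q.2.length := List.mem_range.mp hj
  have := pv_del_length q.2 j hj'
  simp only [this, hU q hq]
  omega

theorem pv_loop_done (st : List (List Char × List Char))
    (hU : ∀ pr ∈ st, pr.2.length = 0) (f : Nat) :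
    pvLoopB f st = st := by
  cases f with
  | zero => rfl
  | succ g =>
    rw [pvLoopB]
    cases st with
    | nil => simp
    | cons pr0 rest =>
      have h0 : pr0.2 = [] := List.length_eq_zero_iff.mp (hU pr0 (by simp))
      rw [if_neg (by simp [h0])]

theorem pv_flatMap_nil_rests (st : List (List Char × List Char))
    (hU : ∀ pr ∈ st, pr.2.length = 0) :
    st.flatMap (fun pr => (pvFP 0 pr.2).map (fun p => pr.1 ++ p)) = st.map Prod.fst := by
  induction st with
  | nil => rfl
  | cons pr rest ih =>
    have h0 : pr.2 = [] := List.length_eq_zero_iff.mp (hU pr (by simp))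
    simp only [List.flatMap_cons, List.map_cons, ih (fun q hq => hU q (by simp [hq]))]
    simp [h0, pvFP]

theorem pv_loopB_eq (f L : Nat) (st : List (List Char × List Char))
    (hU : ∀ pr ∈ st, pr.2.length = L) (hL : L ≤ f) :
    (pvLoopB f st).map Prod.fst
      = st.flatMap (fun pr => (pvFP L pr.2).map (fun p => pr.1 ++ p)) := by
  induction f generalizing st L with
  | zero =>
    have hL0 : L = 0 := by omega
    subst hL0
    rw [pvLoopB, pv_flatMap_nil_rests st hU]
  | succ g ih =>
    cases L with
    | zero =>
      rw [pv_loop_done st hU, pv_flatMap_nil_rests st hU]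
    | succ L' =>
      cases st with
      | nil => simp [pvLoopB]
      | cons pr0 rest =>
        have hh : pr0.2 ≠ [] := by
          intro h
          have := hU pr0 (by simp)
          rw [h] at this; simp at this
        rw [pvLoopB, if_pos ⟨by simp, by simpa using hh⟩]
        rw [ih L' (pvExpandB (pr0 :: rest)) (pv_expand_uniform _ _ hU) (by omega)]
        rw [pvExpandB, List.flatMap_assoc]
        apply List.flatMap_congr
        rintro ⟨pre, rest⟩ hpr
        have hlen : rest.length = L' + 1 := hU _ hpr
        obtain ⟨a, t, rfl⟩ : ∃ a t, rest = a :: t := by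
          cases rest with
          | nil => simp at hlen
          | cons a t => exact ⟨a, t, rfl⟩
        rw [pvFP]
        simp only [List.map_flatMap, List.flatMap_map, List.map_map]
        apply List.flatMap_congr
        intro j hj
        congr 1
        funext p
        simp [Function.comp, List.append_assoc]

theorem pv_init_uniform (cs : List Char) (nf : Option String)
    (pr : List Char × List Char)
    (hpr : pr ∈ (List.range cs.length).flatMap (fun i =>
      let c := cs.getD i ' '
      if nf = none ∨ ¬ nf = some (String.ofList [c]) then
        [([c], cs.take i ++ cs.drop (i + 1))] else [])) :
    pr.2.length = cs.length - 1 := by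
  simp only [List.mem_flatMap] at hpr
  obtain ⟨i, hi, hmem⟩ := hpr
  have hi' : i < cs.length := List.mem_range.mp hi
  split at hmem
  · simp only [List.mem_singleton] at hmem
    subst hmem
    exact pv_del_length cs i hi'
  · simp at hmem

-- map over pairs: project first then stringify
theorem pv_map_fst_ofList (l : List (List Char × List Char)) :
    l.map (fun pr => String.ofList pr.1) = (l.map Prod.fst).map String.ofList := by
  rw [List.map_map]; rfl

-- ===== VERDICT (by name: the statement is the Claim_ definition above) =====
theorem permutate_spec : Claim_equal_permutate := by
  intro s nf _
  unfold Spec_permutate permutate permutate_alt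
  by_cases h1 : s.toList.length = 1
  · rw [if_pos h1]
    rw [permutateCoreA.eq_def, if_pos h1]
    simp [String.ofList_toList]
  · rw [if_neg h1]
    cases hcs : s.toList with
    | nil => simp [permutateCoreA, pvLoopB]
    | cons a t =>
      rw [hcs] at h1
      have hlen : 1 ≤ t.length := by
        rcases t with _ | ⟨b, u⟩
        · simp at h1
        · simp
      have hU : ∀ pr ∈ (List.range (a :: t).length).flatMap (fun i =>
          let c := (a :: t).getD i ' '
          if nf = none ∨ ¬ nf = some (String.ofList [c]) then
            [([c], (a :: t).take i ++ (a :: t).drop (i + 1))] else []),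
          pr.2.length = t.length := by
        intro pr hpr
        have := pv_init_uniform (a :: t) nf pr hpr
        simpa using this
      rw [pv_map_fst_ofList, pv_loopB_eq (a :: t).length t.length _ hU (by simp)]
      have hfuel : (a :: t).length = t.length + 1 := rfl
      rw [hfuel, permutateCoreA, if_neg (by simpa using h1)]
      rw [List.map_flatMap, List.flatMap_assoc, List.map_flatMap]
      apply List.flatMap_congr
      intro i hi
      have hi' : i < (a :: t).length := List.mem_range.mp hi
      have hdl : ((a :: t).take i ++ (a :: t).drop (i + 1)).length = t.length := by
        have := pv_del_length (a :: t) i hi'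
        simpa using this
      have hne' : (a :: t).take i ++ (a :: t).drop (i + 1) ≠ [] :=
        List.length_pos_iff.mp (by rw [hdl]; omega)
      simp only
      split
      · rw [pv_coreA_none t.length _ hne' (by rw [hdl])]
        simp [List.map_map]
      · simp
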